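-- pv_equiv track=rewrite | github.com/gabriellaec/desoft-analise-exercicios | backup/user_053/ch161_2020_06_19_20_36_04_511059.py | denominador
-- ===== SOURCE A (Python) =====
-- def denominador(n):
--     B = 1
--     if n % 2 == 0:
--         for i in range(1, n+2, 2):
--             if i > n:
--                 B *= i
--             else:
--                 B *= i*i
--     else:
--         for i in range(1, n+1, 2):
--             B *= i*i
--     return B
-- ===== SOURCE B (Python) =====
-- def denominador(n):
--     if n < 1:
--         return 1
--     m = n if n % 2 else n - 1       # top odd factor
--     k = (m - 1) // 2                # number of even numbers below m
--     f = 1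
--     for i in range(2, m + 1):       # m! as one plain factorial
--         f *= i
--     g = 1
--     for j in range(2, k + 1):       # k!
--         g *= j
--     d = f // (2 ** k * g)           # double factorial of m, i.e. m! / (2^k * k!)
--     return d * d * (n + 1 if n % 2 == 0 else 1)
-- ===== Notes on version B (the rewrite author's own statement) =====
-- stated objective: alternative
-- what changed: B computes no product of odd numbers at all: it evaluates the double factorial of m through the closed form m!/(2^k*k!) (two plain factorial loops over consecutive integers plus one exact division), squares it once, and multiplies by n+1 in the even case, instead of A's single pass over the odd numbers with a per-iteration square-or-not branch.
import Mathlib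
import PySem

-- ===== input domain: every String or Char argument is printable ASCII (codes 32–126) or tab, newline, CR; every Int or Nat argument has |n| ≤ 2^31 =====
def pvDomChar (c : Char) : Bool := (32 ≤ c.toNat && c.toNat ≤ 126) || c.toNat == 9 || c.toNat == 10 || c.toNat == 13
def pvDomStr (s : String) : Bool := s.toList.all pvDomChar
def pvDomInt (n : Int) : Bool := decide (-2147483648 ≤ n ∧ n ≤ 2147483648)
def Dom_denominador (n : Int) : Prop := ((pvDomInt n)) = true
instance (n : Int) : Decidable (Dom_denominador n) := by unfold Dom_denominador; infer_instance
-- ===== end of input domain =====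

-- B evaluates the double factorial of the top odd factor m by the closed form m!/(2^k*k!) (two plain
-- factorial loops plus one exact division) instead of A's single squaring pass over the odds.

-- ===== PORT A =====
def denominador (n : Int) : Int :=
  if PySem.Int.mod n 2 = 0 then
    (PySem.List.pyRange 1 (n + 2) 2).foldl (fun B i => if i > n then B * i else B * (i * i)) 1
  else
    (PySem.List.pyRange 1 (n + 1) 2).foldl (fun B i => B * (i * i)) 1

-- ===== PORT B =====
def denominador_alt (n : Int) : Int :=
  if n < 1 then 1
  else
    let m : Int := if PySem.Int.mod n 2 ≠ 0 then n else n - 1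
    let k : Int := PySem.Int.floordiv (m - 1) 2
    let f : Int := (PySem.List.pyRange 2 (m + 1) 1).foldl (fun f i => f * i) 1
    let g : Int := (PySem.List.pyRange 2 (k + 1) 1).foldl (fun g j => g * j) 1
    -- 2 ** k: in this branch k ≥ 0, so the Int power equals 2 ^ k.toNat exactly
    let d : Int := PySem.Int.floordiv f (2 ^ k.toNat * g)
    d * d * (if PySem.Int.mod n 2 = 0 then n + 1 else 1)

-- ===== PRECONDITION & SPEC =====
def Spec_denominador (n : Int) (out : Int) : Prop := out = denominador_alt n
instance (n : Int) (out : Int) : Decidable (Spec_denominador n out) := by unfold Spec_denominador; infer_instance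

-- ===== CLAIM (what is proved, stated in full; the proofs are below) =====
def Claim_equal_denominador : Prop := ∀ (n : Int), Dom_denominador n → Spec_denominador n (denominador n)

-- ===== LEMMAS AND PROOFS =====

-- empty step-2 range
lemma pyRange2_nil (b : Int) (h : b ≤ 1) : PySem.List.pyRange 1 b 2 = [] := by
  rw [PySem.List.pyRange_of_pos _ _ (by norm_num)]
  rw [if_neg (by omega)]
  simp

-- for even n ≥ 0, the step-2 range with bound n+2 is the one with bound n plus the element n+1
lemma pyRange2_split (n : Int) (h0 : 0 ≤ n) (he : n % 2 = 0) :
    PySem.List.pyRange 1 (n + 2) 2 = PySem.List.pyRange 1 n 2 ++ [n + 1] := by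
  obtain ⟨k, hk⟩ : ∃ k : Nat, n = 2 * (k : Int) := ⟨(n / 2).toNat, by omega⟩
  rw [PySem.List.pyRange_of_pos _ _ (by norm_num : (0:Int) < 2),
      PySem.List.pyRange_of_pos _ _ (by norm_num : (0:Int) < 2)]
  have h2 : (if (1:Int) < n + 2 then ((n + 2 - 1 + 2 - 1) / 2).toNat else 0) = k + 1 := by
    rw [if_pos (by omega)]; omega
  have h3 : (if (1:Int) < n then ((n - 1 + 2 - 1) / 2).toNat else 0) = k := by
    by_cases hn : (1:Int) < n
    · rw [if_pos hn]; omega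
    · rw [if_neg hn]; omega
  rw [h2, h3, List.range_succ, List.map_append]
  simp only [List.map, hk]
  congr 1
  simp
  omega

-- shifting the accumulator out of a product fold
lemma mulfold (L : List Int) (a : Int) :
    L.foldl (fun d i => d * i) a = a * L.foldl (fun d i => d * i) 1 := by
  induction L generalizing a with
  | nil => simp
  | cons x L ih =>
    simp only [List.foldl_cons]
    rw [ih (a * x), ih (1 * x)]
    ring

-- A's squaring fold is the square of the plain product fold
lemma sqfold (L : List Int) (a : Int) :
    L.foldl (fun B i => B * (i * i)) a
      = a * (L.foldl (fun d i => d * i) 1 * L.foldl (fun d i => d * i) 1) := by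
  induction L generalizing a with
  | nil => simp
  | cons x L ih =>
    simp only [List.foldl_cons]
    rw [ih (a * (x * x)), mulfold L (1 * x)]
    ring

-- B's factorial loop computes the factorial
lemma factfold : ∀ k : Nat,
    (PySem.List.pyRange 2 ((k : Int) + 1) 1).foldl (fun f i => f * i) 1 = (Nat.factorial k : Int)
  | 0 => by rw [PySem.List.pyRange_one_eq_nil (by norm_num)]; rfl
  | 1 => by rw [PySem.List.pyRange_one_eq_nil (by norm_num)]; rfl
  | (k + 2) => by
    have h : ((k : Int) + 2 + 1) = ((k : Int) + 2) + 1 := by ring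
    rw [show ((k + 2 : Nat) : Int) + 1 = (((k + 1 : Nat) : Int) + 1) + 1 by push_cast; ring,
        PySem.List.pyRange_one_succ_right (by push_cast; omega),
        List.foldl_append, mulfold, factfold (k + 1)]
    simp [Nat.factorial]
    ring

-- product of the odd numbers 1,3,...,2k+1
def oddprod (k : Nat) : Int :=
  (PySem.List.pyRange 1 (2 * (k : Int) + 2) 2).foldl (fun d i => d * i) 1

lemma oddprod_succ (k : Nat) : oddprod (k + 1) = oddprod k * (2 * (k : Int) + 3) := by
  unfold oddprod
  push_cast
  rw [show 2 * ((k : Int) + 1) + 2 = (2 * (k : Int) + 2) + 2 by ring,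
      pyRange2_split (2 * (k : Int) + 2) (by omega) (by omega),
      List.foldl_append]
  simp only [List.foldl_cons, List.foldl_nil]
  ring

-- the double-factorial identity: (2k+1)! = oddprod k * 2^k * k!
lemma dfact : ∀ k : Nat,
    ((Nat.factorial (2 * k + 1) : Int)) = oddprod k * 2 ^ k * (Nat.factorial k : Int)
  | 0 => by unfold oddprod; decide
  | (k + 1) => by
    have h : Nat.factorial (2 * (k + 1) + 1) = (2 * k + 3) * ((2 * k + 2) * Nat.factorial (2 * k + 1)) := by
      rw [show 2 * (k + 1) + 1 = (2 * k + 1) + 1 + 1 by ring, Nat.factorial_succ, Nat.factorial_succ]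
    rw [h, show Nat.factorial (k + 1) = (k + 1) * Nat.factorial k from Nat.factorial_succ k]
    push_cast
    rw [dfact k, oddprod_succ]
    ring

-- exact division used by B
lemma exact_div (a b : Int) (hb : 0 < b) : PySem.Int.floordiv (a * b) b = a := by
  rw [PySem.Int.floordiv_eq_ediv_of_pos hb]
  exact Int.mul_ediv_cancel a (by omega)

-- B at n ≥ 1 when its top odd factor is 2k+1
lemma alt_core (n : Int) (k : Nat) (h1 : 1 ≤ n)
    (hm : (if PySem.Int.mod n 2 ≠ 0 then n else n - 1) = 2 * (k : Int) + 1) :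
    denominador_alt n = oddprod k * oddprod k * (if PySem.Int.mod n 2 = 0 then n + 1 else 1) := by
  unfold denominador_alt
  rw [if_neg (by omega)]
  simp only [hm]
  have hk : PySem.Int.floordiv (2 * (k : Int) + 1 - 1) 2 = (k : Int) := by
    rw [show 2 * (k : Int) + 1 - 1 = (k : Int) * 2 by ring]
    exact exact_div _ _ (by norm_num)
  rw [hk]
  have htn : ((k : Int)).toNat = k := by omega
  rw [htn, factfold, show 2 * (k : Int) + 1 + 1 = ((2 * k + 1 : Nat) : Int) + 1 by push_cast; ring,
      factfold, dfact k]
  have hd : PySem.Int.floordiv (oddprod k * 2 ^ k * (Nat.factorial k : Int))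
      (2 ^ k * (Nat.factorial k : Int)) = oddprod k := by
    rw [mul_assoc]
    exact exact_div _ _ (by positivity)
  rw [hd]

-- ===== VERDICT (by name: the statement is the Claim_ definition above) =====
theorem denominador_spec : Claim_equal_denominador := by
  intro n _
  unfold Spec_denominador
  have hmod : PySem.Int.mod n 2 = n % 2 := PySem.Int.mod_eq_emod_of_pos (by norm_num)
  by_cases hlt : n < 1
  · -- n ≤ 0: both sides are 1
    unfold denominador denominador_alt
    rw [if_pos hlt]
    by_cases he : PySem.Int.mod n 2 = 0
    · rw [if_pos he]
      by_cases h0 : n = 0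
      · subst h0; decide
      · rw [pyRange2_nil _ (by rw [hmod] at he; omega)]; rfl
    · rw [if_neg he, pyRange2_nil _ (by omega)]; rfl
  · by_cases he : PySem.Int.mod n 2 = 0
    · -- even n ≥ 2
      obtain ⟨k, hk⟩ : ∃ k : Nat, n = 2 * (k : Int) + 2 := ⟨((n - 2) / 2).toNat, by rw [hmod] at he; omega⟩
      unfold denominador
      rw [if_pos he, pyRange2_split n (by omega) (by rw [hmod] at he; omega), List.foldl_append]
      have hcong : (PySem.List.pyRange 1 n 2).foldl (fun B i => if i > n then B * i else B * (i * i)) 1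
          = (PySem.List.pyRange 1 n 2).foldl (fun B i => B * (i * i)) 1 := by
        apply PySem.List.foldl_congr_mem
        intro acc x hx
        have hb := (PySem.List.mem_pyRange_iff_of_pos (by norm_num : (0:Int) < 2) x).mp hx
        rw [if_neg (by omega)]
      simp only [List.foldl_cons, List.foldl_nil]
      rw [hcong, if_pos (by omega : n + 1 > n), sqfold,
          alt_core n k (by omega) (by rw [if_neg (not_not_intro he), hk]; ring),
          if_pos he]
      have : PySem.List.pyRange 1 n 2 = PySem.List.pyRange 1 (2 * (k : Int) + 2) 2 := by rw [hk]
      rw [this]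
      unfold oddprod
      ring
    · -- odd n ≥ 1
      obtain ⟨k, hk⟩ : ∃ k : Nat, n = 2 * (k : Int) + 1 := ⟨((n - 1) / 2).toNat, by rw [hmod] at he; omega⟩
      unfold denominador
      rw [if_neg he, sqfold,
          alt_core n k (by omega) (by rw [if_pos he]; exact hk),
          if_neg he]
      have : PySem.List.pyRange 1 (n + 1) 2 = PySem.List.pyRange 1 (2 * (k : Int) + 2) 2 := by rw [hk]; ring_nf
      rw [this]
      unfold oddprod
      ring
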